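-- pv_equiv track=rewrite | github.com/furkanaktas/CSE-321 | hw5/decentNumber_141044029.py | fives
-- ===== SOURCE A (Python) =====
-- def fives(num):
-- 	sum_num = 0
-- 	result = 0
-- 	for i in range(num):
-- 		sum_num += 5
-- 		result += (10**i)*5
--
-- 	if sum_num % 3 == 0:
-- 		return result
-- 	else:
-- 		return 0
-- ===== SOURCE B (Python) =====
-- def fives(num):
--     if num > 0 and num % 3 == 0:
--         return 5 * (10**num - 1) // 9
--     return 0
-- ===== Notes on version B (the rewrite author's own statement) =====
-- stated objective: faster
-- what changed: Replaces the O(n) loop accumulating 5*10^i with the closed-form repunit formula 5*(10**num-1)//9 guarded by the divisibility test num % 3 == 0.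
import Mathlib
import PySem

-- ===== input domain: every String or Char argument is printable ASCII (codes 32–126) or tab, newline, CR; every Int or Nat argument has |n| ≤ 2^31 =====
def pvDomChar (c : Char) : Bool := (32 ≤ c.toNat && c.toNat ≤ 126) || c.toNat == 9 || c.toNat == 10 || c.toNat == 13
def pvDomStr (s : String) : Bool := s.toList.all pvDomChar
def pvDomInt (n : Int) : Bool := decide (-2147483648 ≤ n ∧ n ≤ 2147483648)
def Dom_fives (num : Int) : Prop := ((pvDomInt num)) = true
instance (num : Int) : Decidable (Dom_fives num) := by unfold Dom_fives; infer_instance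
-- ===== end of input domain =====

-- B replaces A's accumulation loop by the closed-form repunit formula 5*(10**num-1)//9 (faster: asymptotic).

-- ===== PORT A =====
-- loop 'for i in range(num)' accumulating (sum_num, result); i is nonnegative, so 10**i = 10 ^ i.toNat exactly
def fives (num : Int) : Int :=
  let st := (PySem.List.pyRange 0 num 1).foldl
    (fun (p : Int × Int) i => (p.1 + 5, p.2 + 10 ^ i.toNat * 5)) (0, 0)
  if PySem.Int.mod st.1 3 = 0 then st.2 else 0

-- ===== PORT B =====
-- exponent num is positive inside the branch, so 10**num = 10 ^ num.toNat exactly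
def fives_alt (num : Int) : Int :=
  if 0 < num ∧ PySem.Int.mod num 3 = 0 then
    PySem.Int.floordiv (5 * (10 ^ num.toNat - 1)) 9
  else 0

-- ===== PRECONDITION & SPEC =====
def Spec_fives (num : Int) (out : Int) : Prop := out = fives_alt num
instance (num : Int) (out : Int) : Decidable (Spec_fives num out) := by unfold Spec_fives; infer_instance

-- ===== CLAIM (what is proved, stated in full; the proofs are below) =====
def Claim_equal_fives : Prop := ∀ (num : Int), Dom_fives num → Spec_fives num (fives num)

-- ===== LEMMAS AND PROOFS =====

-- the loop's result accumulator, as a Nat recursion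
def pvRep : Nat → Int
  | 0 => 0
  | n + 1 => pvRep n + 10 ^ n * 5

theorem pvRep_mul (n : Nat) : 9 * pvRep n = 5 * (10 ^ n - 1) := by
  induction n with
  | zero => simp [pvRep]
  | succ n ih => simp only [pvRep, pow_succ]; ring_nf; ring_nf at ih; omega

theorem pvFold_eq (n : Nat) :
    (PySem.List.pyRange 0 (n : Int) 1).foldl
      (fun (p : Int × Int) i => (p.1 + 5, p.2 + 10 ^ i.toNat * 5)) (0, 0)
      = (5 * (n : Int), pvRep n) := by
  induction n with
  | zero => simp [PySem.List.pyRange_one_eq_nil, pvRep]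
  | succ n ih =>
    push_cast
    rw [PySem.List.pyRange_one_succ_right (by exact_mod_cast Nat.zero_le n),
        List.foldl_append]
    push_cast at ih
    rw [ih]
    simp [pvRep]
    ring

-- ===== VERDICT (by name: the statement is the Claim_ definition above) =====

theorem fives_spec : Claim_equal_fives := by
  intro num _
  unfold Spec_fives fives fives_alt
  by_cases hp : 0 < num
  · obtain ⟨n, rfl⟩ : ∃ n : Nat, num = (n : Int) := ⟨num.toNat, (Int.toNat_of_nonneg hp.le).symm⟩
    simp only [pvFold_eq]
    have hmod : PySem.Int.mod (5 * (n : Int)) 3 = 0 ↔ PySem.Int.mod (n : Int) 3 = 0 := by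
      rw [PySem.Int.mod_eq_emod_of_pos (by norm_num),
          PySem.Int.mod_eq_emod_of_pos (by norm_num)]
      omega
    by_cases h3 : PySem.Int.mod (n : Int) 3 = 0
    · rw [if_pos (hmod.mpr h3), if_pos ⟨hp, h3⟩,
          PySem.Int.floordiv_eq_ediv_of_pos (by norm_num)]
      rw [Int.toNat_natCast, ← pvRep_mul, Int.mul_ediv_cancel_left _ (by norm_num)]
    · rw [if_neg (fun h => h3 (hmod.mp h)), if_neg (fun h => h3 h.2)]
  · rw [PySem.List.pyRange_one_eq_nil (by omega)]
    simp [PySem.Int.mod, hp]
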